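-- pv_equiv track=rewrite | github.com/KU-MIDS-MO/assignment2-introp-25-26-RahulRamadas08 | swap_ends.py | swap_ends
-- ===== SOURCE A (Python) =====
-- def swap_ends(L, k):
--     newlist = L
--     if (k <= 0) or (len(L) ==0) or (k > (len(L) / 2)):
--         return (newlist, 0)
--     else:
--         num_swaps = 0
--
--         front = []
--         middle = []
--         end = []
--
--         for i in range(k):
--             front.append(L[i])
--         for i in range(k, len(L) - k):
--             middle.append(L[i])
--         for i in range(len(L) - k, len(L)):
--             end.append(L[i])
--
--         newlist = end + middle + front
--
--         return (newlist, k)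
-- ===== SOURCE B (Python) =====
-- def swap_ends(L, k):
--     n = len(L)
--     if k <= 0 or n == 0 or k > n / 2:
--         return (L, 0)
--     # single pass: each output position j takes its source directly
--     return ([L[n - k + j] if j < k else (L[j - (n - k)] if j >= n - k else L[j])
--              for j in range(n)], k)
-- ===== Notes on version B (the rewrite author's own statement) =====
-- stated objective: simpler
-- what changed: B replaces A's three accumulation loops plus list concatenation with one index-mapping comprehension over range(len(L)) that picks each output element's source position directly.
import Mathlib
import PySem

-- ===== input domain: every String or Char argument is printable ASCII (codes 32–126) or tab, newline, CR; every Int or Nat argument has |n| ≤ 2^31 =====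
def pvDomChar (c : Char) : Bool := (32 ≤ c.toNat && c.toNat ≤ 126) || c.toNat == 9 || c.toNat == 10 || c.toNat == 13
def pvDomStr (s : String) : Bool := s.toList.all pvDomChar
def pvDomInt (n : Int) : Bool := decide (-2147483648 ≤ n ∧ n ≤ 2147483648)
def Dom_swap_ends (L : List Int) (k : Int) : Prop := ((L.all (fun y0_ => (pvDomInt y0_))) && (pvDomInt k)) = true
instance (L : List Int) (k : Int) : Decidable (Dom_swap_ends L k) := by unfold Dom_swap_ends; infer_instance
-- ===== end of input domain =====

-- B rewrites A's three accumulation loops + concatenation as one index-mapping pass; objective: simpler.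

-- ===== PORT A =====
-- Python's guard 'k > len(L) / 2' uses true division; for integer k and list length n
-- (both well below 2^53) it is exactly '2*k > n', which is how it is ported.
def swap_ends (L : List Int) (k : Int) : List Int × Int :=
  let newlist := L
  if k ≤ 0 ∨ L.length = 0 ∨ 2 * k > (L.length : Int) then (newlist, 0)
  else
    let front := (PySem.List.pyRange 0 k 1).foldl
      (fun acc i => acc ++ [PySem.List.pyGetD L i 0]) []
    let middle := (PySem.List.pyRange k ((L.length : Int) - k) 1).foldl
      (fun acc i => acc ++ [PySem.List.pyGetD L i 0]) []
    let end_ := (PySem.List.pyRange ((L.length : Int) - k) (L.length : Int) 1).foldl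
      (fun acc i => acc ++ [PySem.List.pyGetD L i 0]) []
    (end_ ++ middle ++ front, k)

-- ===== PORT B =====
def swap_ends_alt (L : List Int) (k : Int) : List Int × Int :=
  let n : Int := L.length
  if k ≤ 0 ∨ n = 0 ∨ 2 * k > n then (L, 0)
  else
    ((PySem.List.pyRange 0 n 1).map (fun j =>
        if j < k then PySem.List.pyGetD L (n - k + j) 0
        else if j ≥ n - k then PySem.List.pyGetD L (j - (n - k)) 0
        else PySem.List.pyGetD L j 0), k)

-- ===== PRECONDITION & SPEC =====
def Spec_swap_ends (L : List Int) (k : Int) (out : List Int × Int) : Prop := out = swap_ends_alt L k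
instance (L : List Int) (k : Int) (out : List Int × Int) : Decidable (Spec_swap_ends L k out) := by unfold Spec_swap_ends; infer_instance

-- ===== CLAIM (what is proved, stated in full; the proofs are below) =====
def Claim_equal_swap_ends : Prop := ∀ (L : List Int) (k : Int), Dom_swap_ends L k → Spec_swap_ends L k (swap_ends L k)

-- ===== LEMMAS AND PROOFS =====

-- Shift the index range of a mapped function.
theorem map_pyRange_shift (a b c : Int) (f : Int → Int) :
    (PySem.List.pyRange a b 1).map (fun j => f (j + c)) =
      (PySem.List.pyRange (a + c) (b + c) 1).map f := by
  rw [PySem.List.pyRange_one, PySem.List.pyRange_one]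
  have : b + c - (a + c) = b - a := by ring
  rw [this]
  simp only [List.map_map]
  exact List.map_congr_left (fun x _ => by simp [Function.comp]; ring_nf)

-- ===== VERDICT (by name: the statement is the Claim_ definition above) =====
theorem swap_ends_spec : Claim_equal_swap_ends := by
  intro L k _
  unfold Spec_swap_ends swap_ends swap_ends_alt
  dsimp only
  split_ifs with h1 h2
  · rfl
  · exfalso; omega
  · exfalso; omega
  · push Not at h1
    obtain ⟨hk, _, h2k⟩ := h1
    set n : Int := (L.length : Int) with hn
    have hk1 : 0 < k := by omega
    have hkn : k ≤ n - k := by omega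
    have hnk : n - k ≤ n := by omega
    refine Prod.ext ?_ rfl
    -- turn A's foldl-appends into maps
    rw [PySem.List.foldl_append_singleton_eq_map, PySem.List.foldl_append_singleton_eq_map,
        PySem.List.foldl_append_singleton_eq_map]
    -- split B's single range into the three blocks
    rw [PySem.List.pyRange_one_append 0 (n - k) n (by omega) hnk,
        PySem.List.pyRange_one_append 0 k (n - k) (by omega) hkn]
    simp only [List.map_append, List.append_assoc, List.nil_append]
    congr 1
    · -- positions [0, k): B reads L[n-k+j]; equals A's end block
      have h1 : (PySem.List.pyRange 0 k 1).map (fun j =>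
          if j < k then PySem.List.pyGetD L (n - k + j) 0
          else if j ≥ n - k then PySem.List.pyGetD L (j - (n - k)) 0
          else PySem.List.pyGetD L j 0) =
          (PySem.List.pyRange 0 k 1).map (fun j => PySem.List.pyGetD L (j + (n - k)) 0) := by
        refine List.map_congr_left (fun j hj => ?_)
        rw [PySem.List.mem_pyRange_one] at hj
        rw [if_pos hj.2]
        ring_nf
      rw [h1, map_pyRange_shift 0 k (n - k) (fun i => PySem.List.pyGetD L i 0),
          show (0 : Int) + (n - k) = n - k by ring, show k + (n - k) = n by ring]
    congr 1
    · -- positions [k, n-k): identity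
      refine List.map_congr_left (fun j hj => ?_)
      rw [PySem.List.mem_pyRange_one] at hj
      rw [if_neg (by omega), if_neg (by omega)]
    · -- positions [n-k, n): B reads L[j-(n-k)]; equals A's front block
      have h3 : (PySem.List.pyRange (n - k) n 1).map (fun j =>
          if j < k then PySem.List.pyGetD L (n - k + j) 0
          else if j ≥ n - k then PySem.List.pyGetD L (j - (n - k)) 0
          else PySem.List.pyGetD L j 0) =
          (PySem.List.pyRange (n - k) n 1).map (fun j => PySem.List.pyGetD L (j + -(n - k)) 0) := by
        refine List.map_congr_left (fun j hj => ?_)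
        rw [PySem.List.mem_pyRange_one] at hj
        rw [if_neg (by omega), if_pos (by omega)]
        ring_nf
      rw [h3, map_pyRange_shift (n - k) n (-(n - k)) (fun i => PySem.List.pyGetD L i 0),
          show (n - k) + -(n - k) = (0 : Int) by ring, show n + -(n - k) = k by ring]
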